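-- pv_equiv track=rewrite | github.com/hidaruma/caty | main.group/diary/commands/hatena.py | process_attr_value
-- ===== SOURCE A (Python) =====
-- def process_attr_value(iterable):
--     state = u'ready'
--     buff = []
--     for c in iterable:
--         if c == u' ':
--             if state == u'ready':
--                 pass
--             else:
--                 buff.append(c)
--         elif c == u'"':
--             if state == u'ready':
--                 state = u'start'
--             elif state == u'start':
--                 break
--         else:
--             buff.append(c)
--     return ''.join(buff)
-- ===== SOURCE B (Python) =====
-- def process_attr_value(iterable):
--     it = iter(iterable)
--     buff = []
--     # phase 1: scan up to the opening quote; stray non-space chars are collected too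
--     for c in it:
--         if c == u' ':
--             continue
--         elif c == u'"':
--             break
--         else:
--             buff.append(c)
--     # phase 2: collect everything (spaces included) up to the closing quote
--     for c in it:
--         if c == u'"':
--             break
--         buff.append(c)
--     return ''.join(buff)
-- ===== Notes on version B (the rewrite author's own statement) =====
-- stated objective: simpler
-- what changed: Replaces the single state-machine loop by two sequential phases over one shared iterator: find the opening quote, then collect until the closing quote.
import Mathlib
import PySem

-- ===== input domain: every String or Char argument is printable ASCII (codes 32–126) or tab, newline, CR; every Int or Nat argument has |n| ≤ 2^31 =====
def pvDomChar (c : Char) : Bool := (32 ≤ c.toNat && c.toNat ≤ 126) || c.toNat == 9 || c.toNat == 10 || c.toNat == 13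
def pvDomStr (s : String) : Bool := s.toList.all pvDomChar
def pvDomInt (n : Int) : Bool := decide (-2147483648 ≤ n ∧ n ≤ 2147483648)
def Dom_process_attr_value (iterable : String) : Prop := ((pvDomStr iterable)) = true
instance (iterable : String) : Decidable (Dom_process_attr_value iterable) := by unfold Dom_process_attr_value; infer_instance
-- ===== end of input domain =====

-- B replaces A's single state-machine loop by two sequential
-- phases over one shared stream: find the opening quote, then collect to the closing quote (objective: simpler).


-- ===== PORT A =====
-- started = false before the opening quote is seen, true after.
-- The loop's break on the closing quote is the early return of buff.
def pvGoA : List Char → Bool → List Char → List Char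
  | [], _, buff => buff
  | c :: rest, started, buff =>
    if c = ' ' then
      if started then pvGoA rest started (buff ++ [c]) else pvGoA rest started buff
    else if c = '"' then
      if started then buff else pvGoA rest true buff
    else pvGoA rest started (buff ++ [c])

def process_attr_value (iterable : String) : String :=
  String.mk (pvGoA iterable.toList false [])

-- ===== PORT B =====
-- phase 1: scan to the opening quote, collecting stray non-space chars; returns (buff, rest of stream)
def pvPhase1 : List Char → List Char → List Char × List Char
  | [], buff => (buff, [])
  | c :: rest, buff =>
    if c = ' ' then pvPhase1 rest buff
    else if c = '"' then (buff, rest)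
    else pvPhase1 rest (buff ++ [c])

-- phase 2: collect everything up to the closing quote
def pvPhase2 : List Char → List Char → List Char
  | [], buff => buff
  | c :: rest, buff =>
    if c = '"' then buff else pvPhase2 rest (buff ++ [c])

def process_attr_value_alt (iterable : String) : String :=
  let p := pvPhase1 iterable.toList []
  String.mk (pvPhase2 p.2 p.1)

-- ===== PRECONDITION & SPEC =====
def Spec_process_attr_value (iterable : String) (out : String) : Prop := out = process_attr_value_alt iterable
instance (iterable : String) (out : String) : Decidable (Spec_process_attr_value iterable out) := by unfold Spec_process_attr_value; infer_instance

-- ===== CLAIM (what is proved, stated in full; the proofs are below) =====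
def Claim_equal_process_attr_value : Prop := ∀ (iterable : String), Dom_process_attr_value iterable → Spec_process_attr_value iterable (process_attr_value iterable)

-- ===== LEMMAS AND PROOFS =====

-- in the 'start' state, A's loop is exactly phase 2
theorem pvGoA_started (xs : List Char) : ∀ buff, pvGoA xs true buff = pvPhase2 xs buff := by
  induction xs with
  | nil => intro buff; rfl
  | cons c rest ih =>
    intro buff
    by_cases h : c = ' '
    · simp [pvGoA, pvPhase2, h, ih]
    · by_cases h2 : c = '"'
      · simp [pvGoA, pvPhase2, h, h2]
      · simp [pvGoA, pvPhase2, h, h2, ih]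

-- in the 'ready' state, A's loop is phase 1 followed by phase 2
theorem pvGoA_ready (xs : List Char) : ∀ buff,
    pvGoA xs false buff = pvPhase2 (pvPhase1 xs buff).2 (pvPhase1 xs buff).1 := by
  induction xs with
  | nil => intro buff; rfl
  | cons c rest ih =>
    intro buff
    by_cases h : c = ' '
    · simp [pvGoA, pvPhase1, h, ih]
    · by_cases h2 : c = '"'
      · simp [pvGoA, pvPhase1, h, h2, pvGoA_started]
      · simp [pvGoA, pvPhase1, h, h2, ih]

-- ===== VERDICT (by name: the statement is the Claim_ definition above) =====
theorem process_attr_value_spec : Claim_equal_process_attr_value := by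
  intro s _
  unfold Spec_process_attr_value process_attr_value process_attr_value_alt
  simp [pvGoA_ready]
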